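-- pv_equiv track=rewrite | github.com/gene-kira/ASI | ports/portstream.py | fuse_ports_by_process
-- ===== SOURCE A (Python) =====
-- def fuse_ports_by_process(port_data):
--     """
--     Groups ports by process name for symbolic fusion into daemon nodes.
--     Returns a dict: {process_name: [port_entry, ...]}
--     """
--     fusion_map = {}
--     for entry in port_data:
--         key = entry["name"]
--         if key not in fusion_map:
--             fusion_map[key] = []
--         fusion_map[key].append(entry)
--     return fusion_map
-- ===== SOURCE B (Python) =====
-- def fuse_ports_by_process(port_data):
--     """
--     Groups ports by process name for symbolic fusion into daemon nodes.
--     Returns a dict: {process_name: [port_entry, ...]}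
--     Two-pass decomposition: collect the distinct names in first-occurrence
--     order, then build each group with one filtering comprehension per name.
--     """
--     names = list(dict.fromkeys(entry["name"] for entry in port_data))
--     return {name: [entry for entry in port_data if entry["name"] == name]
--             for name in names}
-- ===== Notes on version B (the rewrite author's own statement) =====
-- stated objective: alternative
-- what changed: A builds the groups in a single pass by mutating a dict (create-empty-then-append per entry); B first collects the distinct process names in first-occurrence order via dict.fromkeys and then builds the result with a dict comprehension whose groups are filtering comprehensions over the input, one per distinct name.
import Mathlib
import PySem

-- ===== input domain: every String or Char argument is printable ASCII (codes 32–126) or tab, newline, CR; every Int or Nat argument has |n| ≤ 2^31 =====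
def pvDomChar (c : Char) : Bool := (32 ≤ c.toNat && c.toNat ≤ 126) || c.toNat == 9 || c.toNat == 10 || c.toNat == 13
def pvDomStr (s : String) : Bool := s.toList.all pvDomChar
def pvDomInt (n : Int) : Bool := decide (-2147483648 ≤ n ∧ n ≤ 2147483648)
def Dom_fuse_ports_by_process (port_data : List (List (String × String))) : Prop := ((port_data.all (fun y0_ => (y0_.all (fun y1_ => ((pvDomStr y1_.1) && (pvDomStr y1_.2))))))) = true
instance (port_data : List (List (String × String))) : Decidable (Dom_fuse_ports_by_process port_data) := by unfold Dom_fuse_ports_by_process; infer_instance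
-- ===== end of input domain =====

-- ===== PORT A =====
-- B groups by collecting the distinct names first, then one filter per name; same value, different decomposition ("alternative").
-- entry["name"] — first-match lookup on the entry; entries without a "name" key (KeyError in both A and B) are excluded by Pre_ below.
def pvEntryName (entry : List (String × String)) : String :=
  (PySem.Dict.mk entry).getD "name" ""

def fuse_ports_by_process (port_data : List (List (String × String))) : List (String × List (List (String × String))) :=
  (port_data.foldl
    (fun fusion_map entry =>
      let key := pvEntryName entry
      let fusion_map := if fusion_map.contains key then fusion_map else fusion_map.insert key []
      fusion_map.modify key [] (fun l => l ++ [entry]))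
    PySem.Dict.empty).items

-- ===== PORT B =====
def fuse_ports_by_process_alt (port_data : List (List (String × String))) : List (String × List (List (String × String))) :=
  let names := PySem.List.dedup (port_data.map (fun entry => pvEntryName entry))
  names.map (fun name => (name, port_data.filter (fun entry => pvEntryName entry == name)))

-- ===== PRECONDITION & SPEC =====
-- Pre_ excludes exactly the inputs where some entry lacks a "name" key: there entry["name"] raises KeyError in both A and B.
def Pre_fuse_ports_by_process (port_data : List (List (String × String))) : Prop :=
  ∀ entry ∈ port_data, (PySem.Dict.mk entry).contains "name" = true
instance (port_data : List (List (String × String))) : Decidable (Pre_fuse_ports_by_process port_data) := by unfold Pre_fuse_ports_by_process; infer_instance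

def pvWitness_fuse_ports_by_process : (List (List (String × String))) :=
  [[("name", "nginx"), ("port", "80")], [("name", "sshd"), ("port", "22")], [("name", "nginx"), ("port", "443")]]

def Spec_fuse_ports_by_process (port_data : List (List (String × String))) (out : List (String × List (List (String × String)))) : Prop := out = fuse_ports_by_process_alt port_data
instance (port_data : List (List (String × String))) (out : List (String × List (List (String × String)))) : Decidable (Spec_fuse_ports_by_process port_data out) := by unfold Spec_fuse_ports_by_process; infer_instance

-- ===== CLAIM (what is proved, stated in full; the proofs are below) =====
def Claim_equal_fuse_ports_by_process : Prop := ∀ (port_data : List (List (String × String))), Dom_fuse_ports_by_process port_data → Pre_fuse_ports_by_process port_data → Spec_fuse_ports_by_process port_data (fuse_ports_by_process port_data)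

-- ===== LEMMAS AND PROOFS =====

-- A key absent from `l` is looked up in the appended singleton.
theorem pv_get?_mk_append_self {v : Type} (l : List (String × v)) (k : String) (w : v)
    (h : ∀ p ∈ l, p.1 ≠ k) :
    (PySem.Dict.mk (l ++ [(k, w)])).get? k = some w := by
  induction l with
  | nil => simp [PySem.Dict.get?_mk_cons]
  | cons p rest ih =>
    rw [List.cons_append, PySem.Dict.get?_mk_cons]
    have := h p (by simp)
    simp [this]
    exact ih (fun q hq => h q (by simp [hq]))

-- A's "if key not in fm: fm[key] = []" followed by the append is one `modify` with default [].
theorem pv_setdefault_modify_step {v : Type} (d : PySem.Dict String (List v)) (k : String)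
    (f : List v → List v) :
    (if d.contains k then d else d.insert k []).modify k [] f = d.modify k [] f := by
  by_cases h : d.contains k = true
  · simp [h]
  · rw [Bool.not_eq_true] at h
    have hmem : ∀ p ∈ d.items, p.1 ≠ k := by
      intro p hp hpk
      have : d.contains k = true := by
        simp [PySem.Dict.contains]
        exact ⟨p.2, by rw [← hpk]; simpa using hp⟩
      simp [this] at h
    have hget : (PySem.Dict.mk (d.items ++ [(k, [])])).getD k [] = ([] : List v) := by
      rw [PySem.Dict.getD_eq_get?_getD, pv_get?_mk_append_self _ _ _ hmem]; rfl
    have hgetd : d.getD k [] = [] := PySem.Dict.getD_of_not_contains _ _ h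
    simp only [PySem.Dict.modify, PySem.Dict.insert, h, Bool.false_eq_true, reduceIte,
      PySem.Dict.contains_mk, List.any_append, List.any_cons, BEq.rfl, List.any_nil,
      Bool.or_false, Bool.or_true, beq_iff_eq, List.map_append, List.map_cons, List.map_nil,
      PySem.Dict.mk.injEq, List.append_singleton_inj, Prod.mk.injEq, true_and]
    refine ⟨?_, ?_⟩
    · have : ∀ p ∈ d.items,
          (if p.1 = k then (k, f ((PySem.Dict.mk (d.items ++ [(k, [])])).getD k [])) else p) = p := by
        intro p hp; simp [hmem p hp]
      rw [List.map_congr_left this, List.map_id']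
    · rw [hget, hgetd]

-- A's whole loop is the plain grouping fold by `modify`.
theorem pv_foldA_eq_foldModify (port_data : List (List (String × String)))
    (d : PySem.Dict String (List (List (String × String)))) :
    port_data.foldl
      (fun fusion_map entry =>
        let key := pvEntryName entry
        let fusion_map := if fusion_map.contains key then fusion_map else fusion_map.insert key []
        fusion_map.modify key [] (fun l => l ++ [entry])) d
    = port_data.foldl (fun fm entry => fm.modify (pvEntryName entry) [] (fun l => l ++ [entry])) d := by
  induction port_data generalizing d with
  | nil => rfl
  | cons e rest ih =>
    simp only [List.foldl_cons]
    rw [pv_setdefault_modify_step, ih]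

-- ===== VERDICT (by name: the statement is the Claim_ definition above) =====
theorem fuse_ports_by_process_spec : Claim_equal_fuse_ports_by_process := by
  intro port_data _ _
  unfold Spec_fuse_ports_by_process fuse_ports_by_process fuse_ports_by_process_alt
  rw [pv_foldA_eq_foldModify]
  set G := port_data.foldl (fun fm entry => fm.modify (pvEntryName entry) [] (fun l => l ++ [entry])) PySem.Dict.empty with hG
  have hpair : G = (port_data.map (fun e => (pvEntryName e, e))).foldl
      (fun fm p => fm.modify p.1 [] (fun l => l ++ [p.2])) PySem.Dict.empty := by
    rw [hG, List.foldl_map]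
  have hnd : G.keys.Nodup := by
    rw [hG]
    exact PySem.Dict.nodup_keys_foldl_modify_key port_data pvEntryName []
      (fun _ e => (fun l => l ++ [e])) PySem.Dict.empty (by simp [PySem.Dict.keys_empty])
  have hkeys : G.keys = PySem.List.dedup (port_data.map (fun e => pvEntryName e)) := by
    rw [hG, PySem.Dict.keys_foldl_modify_key, PySem.Dict.keys_empty,
      PySem.Set.update_nil_left, PySem.List.dedup_eq_ofList]
  have hgetD : ∀ k, G.getD k [] = port_data.filter (fun e => pvEntryName e == k) := by
    intro k
    rw [hpair, PySem.Dict.getD_foldl_modify_append, PySem.Dict.getD_empty]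
    simp only [List.nil_append, List.filter_map, List.map_map]
    simp [Function.comp_def]
  rw [PySem.Dict.items_eq_map_keys G hnd [], hkeys]
  exact (List.map_congr_left (fun n _ => by rw [hgetD n])).symm
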